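-- pv_equiv track=rewrite | github.com/h920032/IM_project | data/fixed/tool.py | SetDAY
-- ===== SOURCE A (Python) =====
-- def SetDAY(day, total_day):   #第一天上班是星期幾/幾天
--     set = {'all':list(range(total_day))}
--     set['Mon']=[]; set['Tue']=[]; set['Wed']=[]
--     set['Tru']=[]; set['Fri']=[]
--     # 所有周一，所有週二，所有週三...
--     w = ['Mon','Tue','Wed','Tru','Fri']
--     for i in range(total_day):
--         set[ w[(i+day)%5] ].append(i)
--     return set
-- ===== SOURCE B (Python) =====
-- def SetDAY(day, total_day):
--     # direct arithmetic: weekday j collects exactly the indices (j-day)%5, (j-day)%5+5, ...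
--     def col(j):
--         return list(range((j - day) % 5, total_day, 5))
--     return {'all': list(range(total_day)),
--             'Mon': col(0), 'Tue': col(1), 'Wed': col(2),
--             'Tru': col(3), 'Fri': col(4)}
-- ===== Notes on version B (the rewrite author's own statement) =====
-- stated objective: alternative
-- what changed: Replaces A's per-day scatter loop (appending each index to the bucket chosen by (i+day)%5) with a closed-form dict literal: each weekday list is computed directly as range((j-day)%5, total_day, 5).
import Mathlib
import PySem

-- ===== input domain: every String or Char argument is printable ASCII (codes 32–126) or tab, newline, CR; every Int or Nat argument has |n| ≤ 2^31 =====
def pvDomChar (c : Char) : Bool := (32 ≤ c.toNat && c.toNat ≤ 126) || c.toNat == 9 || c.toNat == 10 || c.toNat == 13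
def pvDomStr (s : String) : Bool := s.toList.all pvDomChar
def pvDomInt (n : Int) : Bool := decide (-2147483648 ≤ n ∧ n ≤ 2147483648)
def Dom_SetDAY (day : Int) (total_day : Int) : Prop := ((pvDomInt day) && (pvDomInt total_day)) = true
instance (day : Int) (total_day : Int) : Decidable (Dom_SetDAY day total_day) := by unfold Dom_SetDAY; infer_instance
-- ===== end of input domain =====

-- B replaces A's per-day scatter loop with a closed-form dict literal: each weekday
-- list is computed directly as range((j-day)%5, total_day, 5) (alternative decomposition, same cost).


-- ===== PORT A =====
-- the weekday-name list w of A
def wA : List String := ["Mon", "Tue", "Wed", "Tru", "Fri"]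

-- body of A's for-loop: set[w[(i+day)%5]].append(i)
-- (the index (i+day)%5 is always in 0..4, so Python's w[...] never raises and
--  pyGetD with an unused default is exact here; .append on the present key = Dict.modify)
def stepA (day : Int) (d : PySem.Dict String (List Int)) (i : Int) : PySem.Dict String (List Int) :=
  d.modify (PySem.List.pyGetD wA (PySem.Int.mod (i + day) 5) "") [] (fun l => l ++ [i])

def SetDAY (day : Int) (total_day : Int) : List (String × List Int) :=
  ((PySem.List.pyRange 0 total_day 1).foldl (stepA day)
    ((((((PySem.Dict.ofList [("all", PySem.List.pyRange 0 total_day 1)]).insert "Mon" []).insert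
      "Tue" []).insert "Wed" []).insert "Tru" []).insert "Fri" [])).items

-- ===== PORT B =====
-- B's helper col(j) = list(range((j - day) % 5, total_day, 5))
def colB (day : Int) (total_day : Int) (j : Int) : List Int :=
  PySem.List.pyRange (PySem.Int.mod (j - day) 5) total_day 5

-- B returns a dict literal with these six distinct keys: as an assoc list it is the list itself
def SetDAY_alt (day : Int) (total_day : Int) : List (String × List Int) :=
  [("all", PySem.List.pyRange 0 total_day 1),
   ("Mon", colB day total_day 0), ("Tue", colB day total_day 1), ("Wed", colB day total_day 2),
   ("Tru", colB day total_day 3), ("Fri", colB day total_day 4)]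

-- ===== PRECONDITION & SPEC =====
def Spec_SetDAY (day : Int) (total_day : Int) (out : List (String × List Int)) : Prop := out = SetDAY_alt day total_day
instance (day : Int) (total_day : Int) (out : List (String × List Int)) : Decidable (Spec_SetDAY day total_day out) := by unfold Spec_SetDAY; infer_instance

-- ===== CLAIM (what is proved, stated in full; the proofs are below) =====
def Claim_equal_SetDAY : Prop := ∀ (day : Int) (total_day : Int), Dom_SetDAY day total_day → Spec_SetDAY day total_day (SetDAY day total_day)

-- ===== LEMMAS AND PROOFS =====

theorem fmod5_eq_emod (a : Int) : PySem.Int.mod a 5 = a % 5 := by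
  simp [PySem.Int.mod, Int.fmod_eq_emod]

theorem pr5_nil (a b : Int) (h : b ≤ a) : PySem.List.pyRange a b 5 = [] := by
  rw [PySem.List.pyRange_of_pos _ _ (by norm_num : (0:Int) < 5), if_neg (by omega)]
  simp

theorem pr5_succ (s : Int) (n : ℕ) (hs : 0 ≤ s) (hs5 : s < 5) :
    PySem.List.pyRange s ((n:Int)+1) 5 =
      PySem.List.pyRange s n 5 ++ (if (5:Int) ∣ ((n:Int) - s) then [(n:Int)] else []) := by
  rw [PySem.List.pyRange_of_pos _ _ (by norm_num : (0:Int) < 5),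
      PySem.List.pyRange_of_pos _ _ (by norm_num : (0:Int) < 5)]
  by_cases hd : (5:Int) ∣ ((n:Int) - s)
  · have hc : (if s < (n:Int)+1 then (((n:Int)+1 - s + 5 - 1)/5).toNat else 0)
        = (if s < (n:Int) then (((n:Int) - s + 5 - 1)/5).toNat else 0) + 1 := by
      split_ifs <;> omega
    rw [hc, if_pos hd, List.range_succ, List.map_append]
    congr 1
    simp only [List.map_cons, List.map_nil, List.cons.injEq, and_true]
    split_ifs <;> omega
  · have hc : (if s < (n:Int)+1 then (((n:Int)+1 - s + 5 - 1)/5).toNat else 0)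
        = (if s < (n:Int) then (((n:Int) - s + 5 - 1)/5).toNat else 0) := by
      split_ifs <;> omega
    rw [hc, if_neg hd, List.append_nil]

theorem col_succ (day : Int) (m : ℕ) (j : Int) (hj : 0 ≤ j ∧ j < 5) :
    colB day ((m:Int)+1) j =
      colB day (m:Int) j ++ (if ((m:Int) + day) % 5 = j then [(m:Int)] else []) := by
  unfold colB
  rw [fmod5_eq_emod,
      pr5_succ _ _ (by omega) (by omega)]
  congr 1
  have h : ((5:Int) ∣ ((m:Int) - ((j - day) % 5))) ↔ ((m:Int) + day) % 5 = j := by omega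
  simp only [h]

theorem inv_fold (day : Int) (n : ℕ) (r : List Int) :
    (PySem.List.pyRange 0 (n:Int) 1).foldl (stepA day)
        (PySem.Dict.mk [("all", r), ("Mon", []), ("Tue", []), ("Wed", []), ("Tru", []), ("Fri", [])]) =
      PySem.Dict.mk [("all", r), ("Mon", colB day n 0), ("Tue", colB day n 1),
        ("Wed", colB day n 2), ("Tru", colB day n 3), ("Fri", colB day n 4)] := by
  induction n with
  | zero =>
    rw [PySem.List.pyRange_one_eq_nil (by norm_num)]
    have hz : ∀ s : Int, PySem.List.pyRange (s % 5) (0:Int) 5 = [] :=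
      fun s => pr5_nil _ 0 (by omega)
    simp [colB, hz]
  | succ m ih =>
    have h1 : PySem.List.pyRange 0 ((m:Int)+1) 1 = PySem.List.pyRange 0 (m:Int) 1 ++ [(m:Int)] :=
      PySem.List.pyRange_one_succ_right (by positivity)
    push_cast
    rw [h1, List.foldl_append, ih]
    simp only [List.foldl_cons, List.foldl_nil]
    have hmd : PySem.Int.mod ((m:Int) + day) 5 = ((m:Int) + day) % 5 := fmod5_eq_emod _
    have hk : ((m:Int) + day) % 5 = 0 ∨ ((m:Int) + day) % 5 = 1 ∨ ((m:Int) + day) % 5 = 2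
        ∨ ((m:Int) + day) % 5 = 3 ∨ ((m:Int) + day) % 5 = 4 := by omega
    have e0 := col_succ day m 0 (by norm_num)
    have e1 := col_succ day m 1 (by norm_num)
    have e2 := col_succ day m 2 (by norm_num)
    have e3 := col_succ day m 3 (by norm_num)
    have e4 := col_succ day m 4 (by norm_num)
    rcases hk with h | h | h | h | h <;>
      rw [e0, e1, e2, e3, e4] <;>
      simp only [stepA, hmd, h, if_pos] <;>
      norm_num <;>
      simp [wA, PySem.List.pyGetD, PySem.Dict.modify, PySem.Dict.insert,
        PySem.Dict.contains, PySem.Dict.getD, PySem.Dict.get?]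

-- ===== VERDICT (by name: the statement is the Claim_ definition above) =====
theorem SetDAY_spec : Claim_equal_SetDAY := by
  intro day t _
  show SetDAY day t = SetDAY_alt day t
  unfold SetDAY SetDAY_alt
  have hinit : ((((((PySem.Dict.ofList [("all", PySem.List.pyRange 0 t 1)]).insert "Mon" []).insert
      "Tue" []).insert "Wed" []).insert "Tru" []).insert "Fri" []) =
      PySem.Dict.mk [("all", PySem.List.pyRange 0 t 1), ("Mon", []), ("Tue", []), ("Wed", []),
        ("Tru", []), ("Fri", [])] := by
    simp [PySem.Dict.ofList, PySem.Dict.insert, PySem.Dict.update, PySem.Dict.empty,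
      PySem.Dict.contains]
  rw [hinit]
  by_cases ht : t ≤ 0
  · rw [PySem.List.pyRange_one_eq_nil ht]
    have hz : ∀ s : Int, PySem.List.pyRange (s % 5) t 5 = [] :=
      fun s => pr5_nil _ t (by omega)
    simp [colB, hz]
  · have htn : t = ((t.toNat : ℕ) : Int) := by omega
    rw [htn, inv_fold day t.toNat]
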